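-- pv_equiv track=rewrite | github.com/mvasilkov/kb | Paint/main.py | pygame_compile_cursor
-- ===== SOURCE A (Python) =====
-- CURSOR = (
--     '       @@@@             ',
--     '       @--@             ',
--     '       @--@             ',
--     '       @--@             ',
--     '       @--@             ',
--     '       @@@@             ',
--     '                        ',
--     '@@@@@@ @@@@ @@@@@@      ',
--     '@----@ @--@ @----@      ',
--     '@----@ @--@ @----@      ',
--     '@@@@@@ @@@@ @@@@@@      ',
--     '                        ',
--     '       @@@@             ',
--     '       @--@             ',
--     '       @--@             ',
--     '       @--@             ',
--     '       @--@             ',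
--     '       @@@@             ',
--     '                        ',
--     '                        ',
--     '                        ',
--     '                        ',
--     '                        ',
--     '                        ',
-- )
--
-- def pygame_compile_cursor(black='@', white='-'):
--     aa, bb = [], []
--     a = b = 0
--     i = 8
--     for s in CURSOR:
--         for c in s:
--             a <<= 1
--             b <<= 1
--             i -= 1
--             if c == black:
--                 a |= 1
--                 b |= 1
--             elif c == white:
--                 b |= 1
--
--             if not i:
--                 aa.append(a)
--                 bb.append(b)
--                 a = b = 0
--                 i = 8
--
--     return tuple(aa), tuple(bb)
-- ===== SOURCE B (Python) =====
-- CURSOR = (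
--     '       @@@@             ',
--     '       @--@             ',
--     '       @--@             ',
--     '       @--@             ',
--     '       @--@             ',
--     '       @@@@             ',
--     '                        ',
--     '@@@@@@ @@@@ @@@@@@      ',
--     '@----@ @--@ @----@      ',
--     '@----@ @--@ @----@      ',
--     '@@@@@@ @@@@ @@@@@@      ',
--     '                        ',
--     '       @@@@             ',
--     '       @--@             ',
--     '       @--@             ',
--     '       @--@             ',
--     '       @--@             ',
--     '       @@@@             ',
--     '                        ',
--     '                        ',
--     '                        ',
--     '                        ',
--     '                        ',
--     '                        ',
-- )
--
-- def pygame_compile_cursor(black='@', white='-'):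
--     flat = ''.join(CURSOR)
--     bits_a = ''.join('1' if c == black else '0' for c in flat)
--     bits_b = ''.join('1' if c == black or c == white else '0' for c in flat)
--
--     def to_bytes(bits):
--         out = []
--         while bits:
--             out.append(int(bits[:8], 2))
--             bits = bits[8:]
--         return tuple(out)
--
--     return to_bytes(bits_a), to_bytes(bits_b)
-- ===== Notes on version B (the rewrite author's own statement) =====
-- stated objective: simpler
-- what changed: Replaces A's running shift/or byte accumulator with its countdown-and-append loop state by first building two full bit-strings over the joined cursor text and then parsing each 8-character chunk as a base-2 integer.
import Mathlib
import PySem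

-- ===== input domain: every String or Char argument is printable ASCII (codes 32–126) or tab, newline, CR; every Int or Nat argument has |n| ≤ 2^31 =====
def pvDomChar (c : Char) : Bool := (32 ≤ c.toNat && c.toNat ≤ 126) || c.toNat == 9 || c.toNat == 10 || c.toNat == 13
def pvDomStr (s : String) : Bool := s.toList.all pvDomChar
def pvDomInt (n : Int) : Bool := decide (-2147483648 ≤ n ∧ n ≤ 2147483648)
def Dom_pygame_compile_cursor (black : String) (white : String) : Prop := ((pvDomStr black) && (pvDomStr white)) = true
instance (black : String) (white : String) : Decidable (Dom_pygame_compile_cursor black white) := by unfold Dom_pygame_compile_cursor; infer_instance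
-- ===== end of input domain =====

-- B replaces A's running shift/or accumulator with 'build the two bit-strings, then parse 8-bit chunks' (objective: simpler decomposition).

-- the module-level CURSOR constant, shared context of both programs
def pvCursor : List String := [
  "       @@@@             ",
  "       @--@             ",
  "       @--@             ",
  "       @--@             ",
  "       @--@             ",
  "       @@@@             ",
  "                        ",
  "@@@@@@ @@@@ @@@@@@      ",
  "@----@ @--@ @----@      ",
  "@----@ @--@ @----@      ",
  "@@@@@@ @@@@ @@@@@@      ",
  "                        ",
  "       @@@@             ",
  "       @--@             ",
  "       @--@             ",
  "       @--@             ",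
  "       @--@             ",
  "       @@@@             ",
  "                        ",
  "                        ",
  "                        ",
  "                        ",
  "                        ",
  "                        "]

-- ===== PORT A =====
-- loop body of A's inner 'for c in s': state is (aa, bb, a, b, i)
def pvStepA (black : String) (white : String)
    (st : List Int × List Int × Int × Int × Int) (c : Char) :
    List Int × List Int × Int × Int × Int :=
  let a := Int.shiftLeft st.2.2.1 1        -- a <<= 1
  let b := Int.shiftLeft st.2.2.2.1 1      -- b <<= 1
  let i := st.2.2.2.2 - 1                  -- i -= 1
  let ab := if String.ofList [c] == black then (Int.lor a 1, Int.lor b 1)   -- a |= 1; b |= 1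
            else if String.ofList [c] == white then (a, Int.lor b 1)        -- b |= 1
            else (a, b)
  if i == 0 then (st.1 ++ [ab.1], st.2.1 ++ [ab.2], 0, 0, 8)            -- if not i: append, reset
  else (st.1, st.2.1, ab.1, ab.2, i)

def pygame_compile_cursor (black : String) (white : String) : List Int × List Int :=
  let st := pvCursor.foldl (fun st s => s.toList.foldl (pvStepA black white) st)
              (([] : List Int), ([] : List Int), (0 : Int), (0 : Int), (8 : Int))
  (st.1, st.2.1)

-- ===== PORT B =====
-- int(bits, 2): exact on the '0'/'1'-only strings B builds
def pvParse2 (bits : List Char) : Int :=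
  bits.foldl (fun v c => 2 * v + (if c = '1' then 1 else 0)) 0

-- B's to_bytes: peel 8 bits at a time
def pvToBytes (bits : List Char) : List Int :=
  match bits with
  | [] => []
  | c :: cs => pvParse2 ((c :: cs).take 8) :: pvToBytes ((c :: cs).drop 8)
termination_by bits.length
decreasing_by simp

def pygame_compile_cursor_alt (black : String) (white : String) : List Int × List Int :=
  let flat := pvCursor.foldl (fun acc s => acc ++ s.toList) ([] : List Char)   -- ''.join(CURSOR)
  let bitsA := flat.map (fun c => if String.ofList [c] == black then '1' else '0')
  let bitsB := flat.map (fun c => if String.ofList [c] == black || String.ofList [c] == white then '1' else '0')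
  (pvToBytes bitsA, pvToBytes bitsB)

-- ===== PRECONDITION & SPEC =====
def Spec_pygame_compile_cursor (black : String) (white : String) (out : List Int × List Int) : Prop := out = pygame_compile_cursor_alt black white
instance (black : String) (white : String) (out : List Int × List Int) : Decidable (Spec_pygame_compile_cursor black white out) := by unfold Spec_pygame_compile_cursor; infer_instance

-- ===== CLAIM (what is proved, stated in full; the proofs are below) =====
def Claim_equal_pygame_compile_cursor : Prop := ∀ (black : String) (white : String), Dom_pygame_compile_cursor black white → Spec_pygame_compile_cursor black white (pygame_compile_cursor black white)

-- ===== LEMMAS AND PROOFS =====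

-- the per-character bit A accumulates into a (resp. b)
def pvBitA (black : String) (c : Char) : Int := if String.ofList [c] == black then 1 else 0
def pvBitB (black : String) (white : String) (c : Char) : Int :=
  if String.ofList [c] == black || String.ofList [c] == white then 1 else 0

-- a-register (resp. b-register) after folding cs from value a
def pvAccA (black : String) (a : Int) (cs : List Char) : Int :=
  cs.foldl (fun v c => 2 * v + pvBitA black c) a
def pvAccB (black : String) (white : String) (b : Int) (cs : List Char) : Int :=
  cs.foldl (fun v c => 2 * v + pvBitB black white c) b

lemma pvShl (a : Int) : Int.shiftLeft a 1 = 2 * a := by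
  have h := Int.shiftLeft_eq a 1
  simpa [mul_comm] using h

lemma pvNatOr1 (n : Nat) : (2 * n) ||| 1 = 2 * n + 1 := by
  have h := Nat.lor_bit false n true 0
  simpa [Nat.bit_val] using h

lemma pvOr1 (a : Int) (h : 0 ≤ a) : Int.lor (2 * a) 1 = 2 * a + 1 := by
  obtain ⟨n, rfl⟩ := Int.eq_ofNat_of_zero_le h
  have h1 : (2 : Int) * (n : Int) = ((2 * n : Nat) : Int) := by push_cast; ring
  rw [h1]
  show Int.lor (Int.ofNat (2 * n)) (Int.ofNat 1) = _
  rw [Int.lor.eq_def]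
  simp [pvNatOr1]

lemma pvBitA_nonneg (black : String) (c : Char) : 0 ≤ pvBitA black c := by
  unfold pvBitA; split <;> norm_num

lemma pvBitB_nonneg (black white : String) (c : Char) : 0 ≤ pvBitB black white c := by
  unfold pvBitB; split <;> norm_num

-- one step of A's loop, rewritten in +/* form
lemma pvStepA_eq (black white : String) (aa bb : List Int) (a b i : Int) (c : Char)
    (ha : 0 ≤ a) (hb : 0 ≤ b) :
    pvStepA black white (aa, bb, a, b, i) c =
      if i - 1 == 0 then (aa ++ [2 * a + pvBitA black c], bb ++ [2 * b + pvBitB black white c], 0, 0, 8)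
      else (aa, bb, 2 * a + pvBitA black c, 2 * b + pvBitB black white c, i - 1) := by
  unfold pvStepA pvBitA pvBitB
  by_cases h1 : (String.ofList [c] == black) = true <;>
    by_cases h2 : (String.ofList [c] == white) = true <;>
      simp [h1, h2, pvShl, pvOr1 a ha, pvOr1 b hb]

lemma pvAccA_nonneg (black : String) (cs : List Char) (a : Int) (ha : 0 ≤ a) :
    0 ≤ pvAccA black a cs := by
  induction cs generalizing a with
  | nil => simpa [pvAccA] using ha
  | cons c cs ih =>
      have hbit := pvBitA_nonneg black c
      simpa [pvAccA, List.foldl_cons] using ih (2 * a + pvBitA black c) (by omega)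

lemma pvAccB_nonneg (black white : String) (cs : List Char) (b : Int) (hb : 0 ≤ b) :
    0 ≤ pvAccB black white b cs := by
  induction cs generalizing b with
  | nil => simpa [pvAccB] using hb
  | cons c cs ih =>
      have hbit := pvBitB_nonneg black white c
      simpa [pvAccB, List.foldl_cons] using ih (2 * b + pvBitB black white c) (by omega)

-- running A's loop over fewer characters than the countdown: no byte is emitted
lemma pvRunPartial (black white : String) :
    ∀ (cs : List Char) (aa bb : List Int) (a b i : Int), 0 ≤ a → 0 ≤ b →
      (cs.length : Int) < i →
      cs.foldl (pvStepA black white) (aa, bb, a, b, i) =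
        (aa, bb, pvAccA black a cs, pvAccB black white b cs, i - cs.length) := by
  intro cs
  induction cs with
  | nil => intro aa bb a b i ha hb hlen; simp [pvAccA, pvAccB]
  | cons c cs ih =>
      intro aa bb a b i ha hb hlen
      simp only [List.length_cons] at hlen
      have hne : (i - 1 == 0) = false := by
        simp only [beq_eq_false_iff_ne, ne_eq]
        push_cast at hlen; omega
      rw [List.foldl_cons, pvStepA_eq black white aa bb a b i c ha hb, hne, if_neg (by simp)]
      have ha' : 0 ≤ 2 * a + pvBitA black c := by
        have := pvBitA_nonneg black c; omega
      have hb' : 0 ≤ 2 * b + pvBitB black white c := by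
        have := pvBitB_nonneg black white c; omega
      rw [ih aa bb _ _ (i - 1) ha' hb' (by push_cast at hlen ⊢; omega)]
      simp only [pvAccA, pvAccB, List.foldl_cons, List.length_cons, Prod.mk.injEq]
      refine ⟨trivial, trivial, trivial, trivial, ?_⟩
      push_cast; ring

-- running A's loop over exactly 8 characters emits one byte and resets
lemma pvChunk8 (black white : String) (cs rest : List Char) (aa bb : List Int)
    (h : cs.length = 8) :
    (cs ++ rest).foldl (pvStepA black white) (aa, bb, 0, 0, 8) =
      rest.foldl (pvStepA black white)
        (aa ++ [pvAccA black 0 cs], bb ++ [pvAccB black white 0 cs], 0, 0, 8) := by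
  rcases List.eq_nil_or_concat cs with rfl | ⟨ys, c, rfl⟩
  · simp at h
  · have hy : ys.length = 7 := by simpa using h
    rw [List.concat_eq_append] at *
    rw [List.foldl_append, List.foldl_append,
        pvRunPartial black white ys aa bb 0 0 8 le_rfl le_rfl (by rw [hy]; norm_num)]
    rw [hy]
    have ha := pvAccA_nonneg black ys 0 le_rfl
    have hb := pvAccB_nonneg black white ys 0 le_rfl
    rw [List.foldl_cons, List.foldl_nil,
        pvStepA_eq black white aa bb _ _ (8 - (7 : Nat)) c ha hb]
    norm_num
    have e1 : pvAccA black 0 (ys ++ [c]) = 2 * pvAccA black 0 ys + pvBitA black c := by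
      simp [pvAccA, List.foldl_append]
    have e2 : pvAccB black white 0 (ys ++ [c]) = 2 * pvAccB black white 0 ys + pvBitB black white c := by
      simp [pvAccB, List.foldl_append]
    rw [e1, e2]

-- parsing the mapped '0'/'1' characters is exactly the bit accumulator
lemma pvParseMap (f : Char → Bool) :
    ∀ (cs : List Char) (v : Int),
      (cs.map (fun c => if f c then '1' else '0')).foldl
          (fun v c => 2 * v + (if c = '1' then 1 else 0)) v =
        cs.foldl (fun v c => 2 * v + (if f c then 1 else 0)) v := by
  intro cs
  induction cs with
  | nil => intro v; simp
  | cons c cs ih =>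
      intro v
      cases hc : f c <;> simp [hc, ih]

lemma pvToBytes_nil : pvToBytes [] = [] := by rw [pvToBytes.eq_def]

lemma pvToBytes_cons (c : Char) (cs : List Char) :
    pvToBytes (c :: cs) = pvParse2 ((c :: cs).take 8) :: pvToBytes ((c :: cs).drop 8) := by
  rw [pvToBytes.eq_def]

-- the main invariant: A's whole loop over 8k characters equals B's chunked parse
lemma pvMain (black white : String) :
    ∀ (k : Nat) (L : List Char) (aa bb : List Int), L.length = 8 * k →
      L.foldl (pvStepA black white) (aa, bb, 0, 0, 8) =
        (aa ++ pvToBytes (L.map (fun c => if String.ofList [c] == black then '1' else '0')),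
         bb ++ pvToBytes (L.map (fun c => if String.ofList [c] == black || String.ofList [c] == white then '1' else '0')),
         0, 0, 8) := by
  intro k
  induction k with
  | zero =>
      intro L aa bb hL
      have : L = [] := by
        cases L with
        | nil => rfl
        | cons x xs => simp at hL
      subst this
      simp [pvToBytes_nil]
  | succ k ih =>
      intro L aa bb hL
      have h8 : 8 ≤ L.length := by omega
      have htake : (L.take 8).length = 8 := by rw [List.length_take]; omega
      have hdrop : (L.drop 8).length = 8 * k := by rw [List.length_drop]; omega
      conv_lhs => rw [← List.take_append_drop 8 L]
      rw [pvChunk8 black white (L.take 8) (L.drop 8) aa bb htake,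
          ih (L.drop 8) _ _ hdrop]
      cases hmap : L.map (fun c => if String.ofList [c] == black then '1' else '0') with
      | nil =>
          simp only [List.map_eq_nil_iff] at hmap
          subst hmap
          simp only [List.length_nil] at hL
          omega
      | cons x xs =>
          cases hmapB : L.map (fun c => if String.ofList [c] == black || String.ofList [c] == white then '1' else '0') with
          | nil =>
              simp only [List.map_eq_nil_iff] at hmapB
              subst hmapB
              simp only [List.length_nil] at hL
              omega
          | cons y ys =>
              rw [← hmap, ← hmapB, hmap, pvToBytes_cons, ← hmap, hmapB, pvToBytes_cons, ← hmapB]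
              rw [← List.map_take, ← List.map_drop, ← List.map_take, ← List.map_drop]
              have hA : pvParse2 ((L.take 8).map (fun c => if String.ofList [c] == black then '1' else '0')) =
                  pvAccA black 0 (L.take 8) := by
                unfold pvParse2 pvAccA pvBitA
                exact pvParseMap (fun c => String.ofList [c] == black) (L.take 8) 0
              have hB : pvParse2 ((L.take 8).map (fun c => if String.ofList [c] == black || String.ofList [c] == white then '1' else '0')) =
                  pvAccB black white 0 (L.take 8) := by
                unfold pvParse2 pvAccB pvBitB
                exact pvParseMap (fun c => String.ofList [c] == black || String.ofList [c] == white) (L.take 8) 0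
              rw [hA, hB]
              simp

-- A's nested fold over the rows is the fold over the flattened character list
lemma pvNestedFlat (black white : String) :
    ∀ (ss : List String) (st : List Int × List Int × Int × Int × Int),
      ss.foldl (fun st s => s.toList.foldl (pvStepA black white) st) st =
        (ss.flatMap String.toList).foldl (pvStepA black white) st := by
  intro ss
  induction ss with
  | nil => intro st; simp
  | cons s ss ih => intro st; simp [List.foldl_append, ih]

-- B's joined string is the flattened character list (both concrete)
set_option maxRecDepth 8000 in
lemma pvFlatEq :
    pvCursor.foldl (fun acc s => acc ++ s.toList) ([] : List Char) =
      pvCursor.flatMap String.toList := by decide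

set_option maxRecDepth 8000 in
lemma pvLen576 : (pvCursor.flatMap String.toList).length = 8 * 72 := by decide

-- ===== VERDICT (by name: the statement is the Claim_ definition above) =====
theorem pygame_compile_cursor_spec : Claim_equal_pygame_compile_cursor := by
  intro black white _
  unfold Spec_pygame_compile_cursor pygame_compile_cursor pygame_compile_cursor_alt
  rw [pvFlatEq, pvNestedFlat black white,
      pvMain black white 72 (pvCursor.flatMap String.toList) [] [] pvLen576]
  simp
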